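-- pv_equiv track=rewrite | github.com/THU-numbda/CapBench | src/capbench/formats/spef/openrcx_to_simple_spef.py | _normalize_ports_block
-- ===== SOURCE A (Python) =====
-- from typing import DefaultDict, Dict, Iterable, List, Tuple
--
-- def _normalize_ports_block(text: str) -> str:
--     lines = text.splitlines()
--     out: List[str] = []
--     in_ports = False
--     for ln in lines:
--         s = ln.rstrip("\n")
--         if s.startswith("*PORTS"):
--             in_ports = True
--             out.append(s)
--             continue
--         if in_ports:
--             if s.startswith("*"):
--                 in_ports = False
--                 out.append(s)
--                 continue
--             if s.strip() == "":
--                 out.append(s)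
--                 continue
--             out.append("*" + s)
--             continue
--         out.append(s)
--     suffix = "\n" if text.endswith("\n") else ""
--     return "\n".join(out) + suffix
-- ===== SOURCE B (Python) =====
-- def _normalize_ports_block(text: str) -> str:
--     lines = text.splitlines()
--     out = []
--     i = 0
--     n = len(lines)
--     while i < n:
--         ln = lines[i]
--         i += 1
--         out.append(ln)
--         if ln.startswith("*PORTS"):
--             # inner loop: consume the block body, stop (without consuming)
--             # at the next '*' line so the outer loop re-examines it
--             while i < n and not lines[i].startswith("*"):
--                 nxt = lines[i]
--                 i += 1
--                 if nxt.strip() == "":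
--                     out.append(nxt)
--                 else:
--                     out.append("*" + nxt)
--     return "\n".join(out) + ("\n" if text.endswith("\n") else "")
-- ===== Notes on version B (the rewrite author's own statement) =====
-- stated objective: alternative
-- what changed: Replaces A's boolean in_ports flag threaded through one flat loop by an index-based outer loop with a nested inner loop that consumes a PORTS block's body and stops, without consuming, at the next '*' line; the rstrip('\n') per line is dropped as splitlines never leaves newlines.
import Mathlib
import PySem

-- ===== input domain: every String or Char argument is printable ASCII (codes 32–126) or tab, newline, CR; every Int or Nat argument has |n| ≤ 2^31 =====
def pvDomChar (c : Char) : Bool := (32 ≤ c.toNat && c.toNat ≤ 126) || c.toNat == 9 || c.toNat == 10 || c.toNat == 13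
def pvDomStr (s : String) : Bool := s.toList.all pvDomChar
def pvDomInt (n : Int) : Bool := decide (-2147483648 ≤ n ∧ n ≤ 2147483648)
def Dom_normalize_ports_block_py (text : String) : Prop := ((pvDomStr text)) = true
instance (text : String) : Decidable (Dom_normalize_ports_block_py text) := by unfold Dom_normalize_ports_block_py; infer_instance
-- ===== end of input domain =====

-- B replaces A's in_ports boolean flag by an outer loop plus a nested inner loop over the
-- PORTS block body (stopping, without consuming, at the next '*' line); same cost, clearer shape.

-- ===== PORT A =====

-- hand port of Python `s.rstrip("\n")` (PySem has no chars-argument rstrip):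
-- drop all trailing '\n' characters; exact on every string
def pvRstripNl (s : String) : String :=
  String.ofList ((s.toList.reverse.dropWhile (fun c => c == '\n')).reverse)

def pvStepA (st : List String × Bool) (ln : String) : List String × Bool :=
  let s := pvRstripNl ln
  if PySem.Str.startswith s "*PORTS" then (st.1 ++ [s], true)
  else if st.2 then
    if PySem.Str.startswith s "*" then (st.1 ++ [s], false)
    else if PySem.Str.strip s == "" then (st.1 ++ [s], st.2)
    else (st.1 ++ ["*" ++ s], st.2)
  else (st.1 ++ [s], st.2)

def normalize_ports_block_py (text : String) : String :=
  let lines := PySem.Str.splitlines text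
  let out := (lines.foldl pvStepA ([], false)).1
  let suffix := if PySem.Str.endswith text "\n" then "\n" else ""
  PySem.Str.join "\n" out ++ suffix

-- ===== PORT B =====

-- inner while loop of Source B: returns (appended lines, unconsumed remainder)
def pvInnerB : List String → List String × List String
  | [] => ([], [])
  | ln :: rest =>
    if PySem.Str.startswith ln "*" then ([], ln :: rest)
    else if PySem.Str.strip ln == "" then
      let p := pvInnerB rest
      (ln :: p.1, p.2)
    else
      let p := pvInnerB rest
      (("*" ++ ln) :: p.1, p.2)

-- needed by pvOuterB's termination: the inner loop never un-consumes lines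
theorem pvInnerB_len_le : ∀ ls : List String, (pvInnerB ls).2.length ≤ ls.length := by
  intro ls
  induction ls with
  | nil => simp [pvInnerB]
  | cons ln rest ih =>
    simp only [pvInnerB]
    split
    · simp
    · split <;> simpa using Nat.le_succ_of_le ih

-- outer while loop of Source B
def pvOuterB : List String → List String
  | [] => []
  | ln :: rest =>
    if PySem.Str.startswith ln "*PORTS" then
      ln :: ((pvInnerB rest).1 ++ pvOuterB (pvInnerB rest).2)
    else ln :: pvOuterB rest
termination_by ls => ls.length
decreasing_by
  · have := pvInnerB_len_le rest; simp; omega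
  · simp

def normalize_ports_block_py_alt (text : String) : String :=
  let lines := PySem.Str.splitlines text
  PySem.Str.join "\n" (pvOuterB lines) ++ (if PySem.Str.endswith text "\n" then "\n" else "")

-- ===== PRECONDITION & SPEC =====
def Spec_normalize_ports_block_py (text : String) (out : String) : Prop := out = normalize_ports_block_py_alt text
instance (text : String) (out : String) : Decidable (Spec_normalize_ports_block_py text out) := by unfold Spec_normalize_ports_block_py; infer_instance

-- ===== CLAIM (what is proved, stated in full; the proofs are below) =====
def Claim_equal_normalize_ports_block_py : Prop := ∀ (text : String), Dom_normalize_ports_block_py text → Spec_normalize_ports_block_py text (normalize_ports_block_py text)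

-- ===== LEMMAS AND PROOFS =====

-- lines produced by splitlines contain no line-break characters
theorem pv_go_no_break (isB : Char → Bool) (s cur : List Char) (acc : List (List Char))
    (hc : ∀ c ∈ cur, isB c = false)
    (ha : ∀ l ∈ acc, ∀ c ∈ l, isB c = false) :
    ∀ l ∈ PySem.Chars.splitlines.go isB s cur acc, ∀ c ∈ l, isB c = false := by
  fun_induction PySem.Chars.splitlines.go isB s cur acc
  case case1 =>
    intro l hl c hc'
    exact ha l (by simpa using hl) c hc'
  case case2 =>
    intro l hl c hc'
    simp only [List.mem_reverse, List.mem_cons] at hl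
    rcases hl with h | h
    · exact hc c (by simpa [h] using hc')
    · exact ha l h c hc'
  case case3 rest cur acc ih =>
    refine ih (by simp) ?_
    intro l hl c hc'
    rcases List.mem_cons.1 hl with h | h
    · exact hc c (by simpa [h] using hc')
    · exact ha l h c hc'
  case case4 c rest cur acc hne hb ih =>
    refine ih (by simp) ?_
    intro l hl c' hc'
    rcases List.mem_cons.1 hl with h | h
    · exact hc c' (by simpa [h] using hc')
    · exact ha l h c' hc'
  case case5 c rest cur acc hne hb ih =>
    refine ih ?_ ha
    intro c' hc'
    rcases List.mem_cons.1 hc' with h | h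
    · subst h; simpa using hb
    · exact hc c' h

theorem pv_splitlines_no_nl (s : String) :
    ∀ l ∈ PySem.Str.splitlines s, '\n' ∉ l.toList := by
  intro l hl hmem
  have hl' : l.toList ∈ PySem.Chars.splitlines s.toList := by
    have := PySem.Str.splitlines_map_toList s
    rw [← this]
    exact List.mem_map_of_mem hl
  have := pv_go_no_break _ s.toList [] [] (by simp) (by simp) l.toList hl' '\n' hmem
  simp at this

theorem pv_dropWhile_nl (l : List Char) (h : '\n' ∉ l) :
    List.dropWhile (fun c => c == '\n') l = l := by
  cases l with
  | nil => rfl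
  | cons a t =>
    have ha : a ≠ '\n' := by rintro rfl; exact h (by simp)
    simp [ha]

theorem pv_rstripNl_id (s : String) (h : '\n' ∉ s.toList) : pvRstripNl s = s := by
  unfold pvRstripNl
  rw [pv_dropWhile_nl _ (by simpa using h)]
  simp

theorem pv_starts_ports_starts_star (l : List Char)
    (h : PySem.Chars.startswith l "*PORTS".toList = true) :
    PySem.Chars.startswith l "*".toList = true := by
  rw [PySem.Chars.startswith_iff] at h ⊢
  exact List.IsPrefix.trans (by decide) h

theorem pvLitPORTS : "*PORTS".toList = ['*', 'P', 'O', 'R', 'T', 'S'] := by decide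
theorem pvLitSTAR : "*".toList = ['*'] := by decide

-- the joint loop invariant: A's fold with flag false matches B's outer loop,
-- and with flag true matches B's inner loop followed by the outer loop on the remainder
theorem pv_main (lines : List String) (h : ∀ l ∈ lines, '\n' ∉ l.toList) :
    (∀ acc, (lines.foldl pvStepA (acc, false)).1 = acc ++ pvOuterB lines) ∧
    (∀ acc, (lines.foldl pvStepA (acc, true)).1
      = acc ++ ((pvInnerB lines).1 ++ pvOuterB (pvInnerB lines).2)) := by
  induction lines with
  | nil => simp [pvOuterB, pvInnerB]
  | cons ln rest ih =>
    have hln : '\n' ∉ ln.toList := h ln (by simp)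
    have hrest := ih (fun l hl => h l (List.mem_cons_of_mem _ hl))
    have hrs : pvRstripNl ln = ln := pv_rstripNl_id ln hln
    constructor
    · intro acc
      by_cases hP : PySem.Chars.startswith ln.toList "*PORTS".toList = true
      all_goals have hP' := hP
      all_goals simp only [Bool.not_eq_true, pvLitPORTS] at hP'
      · simp only [List.foldl_cons, pvStepA, hrs, PySem.Str.startswith_eq]
        rw [if_pos hP, hrest.2]
        simp [pvOuterB, hP']
      · simp only [List.foldl_cons, pvStepA, hrs, PySem.Str.startswith_eq]
        rw [if_neg hP, if_neg (by simp), hrest.1]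
        simp [pvOuterB, hP']
    · intro acc
      by_cases hP : PySem.Chars.startswith ln.toList "*PORTS".toList = true
      all_goals have hP' := hP
      all_goals simp only [Bool.not_eq_true, pvLitPORTS] at hP'
      · have hS := pv_starts_ports_starts_star ln.toList hP
        have hS' := hS
        simp only [pvLitSTAR] at hS'
        simp only [List.foldl_cons, pvStepA, hrs, PySem.Str.startswith_eq]
        rw [if_pos hP, hrest.2]
        simp [pvOuterB, pvInnerB, hP', hS']
      · by_cases hS : PySem.Chars.startswith ln.toList "*".toList = true
        all_goals have hS' := hS
        all_goals simp only [Bool.not_eq_true, pvLitSTAR] at hS'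
        · simp only [List.foldl_cons, pvStepA, hrs, PySem.Str.startswith_eq]
          rw [if_neg hP, if_pos (by simp), if_pos hS, hrest.1]
          simp [pvOuterB, pvInnerB, hP', hS']
        · by_cases hE : (PySem.Str.strip ln == "") = true
          · simp only [List.foldl_cons, pvStepA, hrs, PySem.Str.startswith_eq]
            rw [if_neg hP, if_pos (by simp), if_neg hS, if_pos hE, hrest.2]
            simp [pvInnerB, hS', hE]
          · simp only [List.foldl_cons, pvStepA, hrs, PySem.Str.startswith_eq]
            rw [if_neg hP, if_pos (by simp), if_neg hS, if_neg hE, hrest.2]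
            simp [pvInnerB, hS', hE]

-- ===== VERDICT (by name: the statement is the Claim_ definition above) =====
theorem normalize_ports_block_py_spec : Claim_equal_normalize_ports_block_py := by
  intro text _
  unfold Spec_normalize_ports_block_py normalize_ports_block_py normalize_ports_block_py_alt
  have h := (pv_main (PySem.Str.splitlines text) (pv_splitlines_no_nl text)).1 []
  simp only [h, List.nil_append]
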